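-- pv_equiv track=rewrite | github.com/xebelge/cuisine-recommendation-system | Derya_Cezik_Eda_Belge.py | transform_ratings_to_cuisine
-- ===== SOURCE A (Python) =====
-- def transform_ratings_to_cuisine(ratings):
--     cuisine_based_ratings = {}
--     for user, user_ratings in ratings.items():
--         for cuisine, rating in user_ratings.items():
--             if cuisine not in cuisine_based_ratings:
--                 cuisine_based_ratings[cuisine] = {}
--             cuisine_based_ratings[cuisine][user] = rating
--     return cuisine_based_ratings
-- ===== SOURCE B (Python) =====
-- def transform_ratings_to_cuisine(ratings):
--     cuisines = dict.fromkeys(c for r in ratings.values() for c in r)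
--     return {c: {u: r[c] for u, r in ratings.items() if c in r} for c in cuisines}
-- ===== Notes on version B (the rewrite author's own statement) =====
-- stated objective: idiomatic
-- what changed: A builds the transposed dict with a user-outer single pass that mutates nested dicts; B first collects the distinct cuisines in first-appearance order with dict.fromkeys and then builds the result as one dict comprehension, rescanning the users per cuisine (cuisine-outer).
import Mathlib
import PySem

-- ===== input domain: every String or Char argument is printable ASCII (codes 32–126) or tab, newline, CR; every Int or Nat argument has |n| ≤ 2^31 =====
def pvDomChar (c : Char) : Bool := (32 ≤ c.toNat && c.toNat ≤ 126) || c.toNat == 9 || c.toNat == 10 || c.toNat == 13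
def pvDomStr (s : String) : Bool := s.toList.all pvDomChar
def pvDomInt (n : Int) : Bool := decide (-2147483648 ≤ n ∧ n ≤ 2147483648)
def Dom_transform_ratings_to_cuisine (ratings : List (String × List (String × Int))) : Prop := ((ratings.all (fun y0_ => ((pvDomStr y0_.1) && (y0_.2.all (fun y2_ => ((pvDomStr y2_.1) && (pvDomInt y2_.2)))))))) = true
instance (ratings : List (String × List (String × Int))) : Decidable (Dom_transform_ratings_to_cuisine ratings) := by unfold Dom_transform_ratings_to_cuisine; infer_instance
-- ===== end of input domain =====

-- B replaces A's user-outer pass that mutates nested dicts by a cuisine-outer dict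
-- comprehension over cuisines collected with dict.fromkeys (idiomatic; return value only).

-- ===== PORT A =====
-- body of A's inner `for cuisine, rating in user_ratings.items()` loop:
-- `if cuisine not in cbr: cbr[cuisine] = {}` then `cbr[cuisine][user] = rating`
def pvInnerStep (user : String) (cbr : PySem.Dict String (PySem.Dict String Int))
    (q : String × Int) : PySem.Dict String (PySem.Dict String Int) :=
  let cbr := if cbr.contains q.1 then cbr else cbr.insert q.1 (PySem.Dict.mk [])
  -- `cbr[cuisine][user] = rating` = modify (key is present by now)
  cbr.modify q.1 (PySem.Dict.mk []) (fun d => d.insert user q.2)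

-- body of A's outer `for user, user_ratings in ratings.items()` loop
def pvUserStep (cbr : PySem.Dict String (PySem.Dict String Int))
    (p : String × List (String × Int)) : PySem.Dict String (PySem.Dict String Int) :=
  p.2.foldl (pvInnerStep p.1) cbr

def transform_ratings_to_cuisine (ratings : List (String × List (String × Int))) :
    List (String × List (String × Int)) :=
  ((ratings.foldl pvUserStep (PySem.Dict.mk [])).items).map (fun p => (p.1, p.2.items))

-- ===== PORT B =====
-- `{u: r[c] for u, r in ratings.items() if c in r}` for one cuisine c
def pvBucket (ratings : List (String × List (String × Int))) (c : String) :
    List (String × Int) :=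
  ratings.filterMap (fun p => ((PySem.Dict.mk p.2).get? c).map (fun r => (p.1, r)))

def transform_ratings_to_cuisine_alt (ratings : List (String × List (String × Int))) :
    List (String × List (String × Int)) :=
  -- `cuisines = dict.fromkeys(c for r in ratings.values() for c in r)`
  let cuisines := PySem.List.dedup (ratings.flatMap (fun p => p.2.map Prod.fst))
  -- `{c: {...} for c in cuisines}`
  cuisines.map (fun c => (c, pvBucket ratings c))

-- ===== PRECONDITION & SPEC =====
-- Pre_ excludes association lists with duplicate user keys or duplicate cuisine keys
-- inside one user's ratings: such lists do not represent a Python dict (duplicates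
-- collapse before A ever runs), and the ports' overwrite-in-place vs first-match
-- treatments of them are both accidental.
def Pre_transform_ratings_to_cuisine (ratings : List (String × List (String × Int))) : Prop :=
  (ratings.map Prod.fst).Nodup ∧ ∀ p ∈ ratings, (p.2.map Prod.fst).Nodup
instance (ratings : List (String × List (String × Int))) : Decidable (Pre_transform_ratings_to_cuisine ratings) := by
  unfold Pre_transform_ratings_to_cuisine; infer_instance

def pvWitness_transform_ratings_to_cuisine : (List (String × List (String × Int))) :=
  [("alice", [("turkish", 5)]), ("bob", [("turkish", 3), ("italian", 4)])]

def Spec_transform_ratings_to_cuisine (ratings : List (String × List (String × Int))) (out : List (String × List (String × Int))) : Prop := out = transform_ratings_to_cuisine_alt ratings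
instance (ratings : List (String × List (String × Int))) (out : List (String × List (String × Int))) : Decidable (Spec_transform_ratings_to_cuisine ratings out) := by unfold Spec_transform_ratings_to_cuisine; infer_instance

-- ===== CLAIM (what is proved, stated in full; the proofs are below) =====
def Claim_equal_transform_ratings_to_cuisine : Prop := ∀ (ratings : List (String × List (String × Int))), Dom_transform_ratings_to_cuisine ratings → Pre_transform_ratings_to_cuisine ratings → Spec_transform_ratings_to_cuisine ratings (transform_ratings_to_cuisine ratings)

-- ===== LEMMAS AND PROOFS =====

-- the flattened cuisine keys of the input
def pvKeysOf (ratings : List (String × List (String × Int))) : List String :=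
  ratings.flatMap (fun p => p.2.map Prod.fst)

-- the value B's port produces, as a Dict of Dicts (A's accumulator reaches exactly this)
def pvTarget (ratings : List (String × List (String × Int))) :
    PySem.Dict String (PySem.Dict String Int) :=
  PySem.Dict.mk ((PySem.List.dedup (pvKeysOf ratings)).map
    (fun c => (c, PySem.Dict.mk (pvBucket ratings c))))

-- what A's inner loop over `ur` does to an accumulator: existing buckets for
-- cuisines of ur get (u, rating) appended, new cuisines are appended with a fresh bucket
def pvExpand (acc : PySem.Dict String (PySem.Dict String Int)) (u : String)
    (ur : List (String × Int)) : PySem.Dict String (PySem.Dict String Int) :=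
  PySem.Dict.mk
    (acc.items.map (fun p => (p.1,
        match (PySem.Dict.mk ur).get? p.1 with
        | some r => PySem.Dict.mk (p.2.items ++ [(u, r)])
        | none => p.2))
     ++ (ur.filter (fun q => !acc.contains q.1)).map
          (fun q => (q.1, PySem.Dict.mk [(u, q.2)])))

lemma dict_items_ext {κ ν : Type} {a b : PySem.Dict κ ν} (h : a.items = b.items) : a = b := by
  cases a; cases b; simpa using h

lemma insert_insert_same {κ ν : Type} [BEq κ] [LawfulBEq κ]
    (d : PySem.Dict κ ν) (k : κ) (v w : ν) : (d.insert k v).insert k w = d.insert k w := by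
  apply dict_items_ext
  by_cases hc : d.contains k
  · have h1 : (d.insert k v).contains k = true := PySem.Dict.contains_insert_self d k v
    rw [PySem.Dict.items_insert_of_contains _ w h1, PySem.Dict.items_insert_of_contains _ v hc,
        PySem.Dict.items_insert_of_contains _ w hc, List.map_map]
    apply List.map_congr_left
    intro p _
    by_cases hp : p.1 == k <;> simp [hp]
  · have hc' : d.contains k = false := by simpa using hc
    have hall : ∀ p ∈ d.items, (p.1 == k) = false := by
      simpa [PySem.Dict.contains, List.any_eq_false] using hc'
    have h1 : (d.insert k v).contains k = true := PySem.Dict.contains_insert_self d k v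
    rw [PySem.Dict.items_insert_of_contains _ w h1, PySem.Dict.items_insert_of_not_contains _ v hc',
        PySem.Dict.items_insert_of_not_contains _ w hc', List.map_append]
    congr 1
    · conv_rhs => rw [← List.map_id d.items]
      apply List.map_congr_left
      intro p hp
      simp [hall p hp]
    · simp

lemma foldl_add_nodup (b s : List String) (hb : b.Nodup) :
    b.foldl PySem.Set.add s = s ++ b.filter (fun x => !s.contains x) := by
  induction b generalizing s with
  | nil => simp
  | cons x b' ih =>
    rcases List.nodup_cons.mp hb with ⟨hx, hb'⟩
    by_cases hm : x ∈ s
    · rw [List.foldl_cons, PySem.Set.add_of_mem hm, ih s hb']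
      simp [hm]
    · rw [List.foldl_cons, PySem.Set.add_of_not_mem hm, ih _ hb']
      simp only [List.filter_cons, List.contains_eq_mem, hm, decide_false, Bool.not_false,
        if_true, List.append_assoc, List.singleton_append]
      congr 1
      congr 1
      apply List.filter_congr
      intro y hy
      have : y ≠ x := fun h => hx (h ▸ hy)
      simp [this]

lemma bucket_append (done : List (String × List (String × Int))) (u : String)
    (ur : List (String × Int)) (c : String) :
    pvBucket (done ++ [(u, ur)]) c
      = pvBucket done c ++ (((PySem.Dict.mk ur).get? c).map (fun r => (u, r))).toList := by
  simp only [pvBucket, List.filterMap_append]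
  congr 1

lemma bucket_nil_of_not_mem (done : List (String × List (String × Int))) (c : String)
    (h : c ∉ pvKeysOf done) : pvBucket done c = [] := by
  rw [pvBucket, List.filterMap_eq_nil_iff]
  intro p hp
  have hq : ∀ q ∈ p.2, ¬ ((q.1 == c) = true) := by
    intro q hq hqc
    apply h
    simp only [pvKeysOf, List.mem_flatMap]
    exact ⟨p, hp, by simp only [List.mem_map]; exact ⟨q, hq, by simpa using hqc⟩⟩
  rw [PySem.Dict.get?]
  simp [List.find?_eq_none.mpr hq]

lemma bucket_fst_mem (done : List (String × List (String × Int))) (c : String)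
    {x : String} {r : Int} (h : (x, r) ∈ pvBucket done c) : x ∈ done.map Prod.fst := by
  rw [pvBucket, List.mem_filterMap] at h
  obtain ⟨p, hp, he⟩ := h
  cases hg : (PySem.Dict.mk p.2).get? c <;> rw [hg] at he <;> simp at he
  simp only [List.mem_map]
  exact ⟨p, hp, he.1⟩

lemma target_get? (done : List (String × List (String × Int))) (c : String)
    (d : PySem.Dict String Int) (h : (pvTarget done).get? c = some d) :
    d = PySem.Dict.mk (pvBucket done c) := by
  rw [pvTarget, PySem.Dict.get?] at h
  rw [List.find?_map] at h
  cases hf : List.find? ((fun p => p.1 == c) ∘ fun c => (c, PySem.Dict.mk (pvBucket done c))) (PySem.List.dedup (pvKeysOf done)) with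
  | none => rw [hf] at h; simp at h
  | some e =>
    rw [hf] at h
    have he : e = c := by
      have := List.find?_some hf
      simpa using this
    simp only [Option.map_some] at h
    cases h
    rw [he]

lemma target_fresh (done : List (String × List (String × Int))) (u : String)
    (hu : u ∉ done.map Prod.fst) :
    ∀ c d, (pvTarget done).get? c = some d → d.contains u = false := by
  intro c d h
  rw [target_get? done c d h]
  rw [PySem.Dict.contains]
  simp only [List.any_eq_false]
  rintro ⟨x, r⟩ hm
  have := bucket_fst_mem done c hm
  simp only [beq_iff_eq]
  rintro rfl
  exact hu this

lemma get?_mk_eq_none (l : List (String × Int)) (c : String) (h : c ∉ l.map Prod.fst) :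
    (PySem.Dict.mk l).get? c = none := by
  rw [PySem.Dict.get?, List.find?_eq_none.mpr]
  · rfl
  · rintro ⟨a, b⟩ hm hab
    exact h (List.mem_map.mpr ⟨(a, b), hm, beq_iff_eq.mp hab⟩)

lemma not_fst_eq_of_not_contains {ν : Type} (d : PySem.Dict String ν) (c : String)
    (hc : d.contains c = false) : ∀ p ∈ d.items, p.1 ≠ c := by
  intro p hp
  simp only [PySem.Dict.contains, List.any_eq_false] at hc
  simpa using hc p hp

lemma target_contains (done : List (String × List (String × Int))) (c : String) :
    (pvTarget done).contains c = decide (c ∈ pvKeysOf done) := by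
  rw [pvTarget, PySem.Dict.contains]
  by_cases h : c ∈ pvKeysOf done <;>
    simp [List.any_map, Function.comp_def, List.any_eq_true, beq_iff_eq, PySem.Set.mem_ofList,
      PySem.List.dedup_eq_ofList, h]
  exact fun x hx hxc => h (hxc ▸ hx)

lemma get?_mk_of_mem (ur : List (String × Int)) (q : String × Int)
    (hq : q ∈ ur) (hnd : (ur.map Prod.fst).Nodup) : (PySem.Dict.mk ur).get? q.1 = some q.2 := by
  apply PySem.Dict.get?_of_mem_items (d := PySem.Dict.mk ur) (k := q.1) (v := q.2)
  · simpa using hq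
  · simpa [PySem.Dict.keys] using hnd

lemma keysOf_append (done : List (String × List (String × Int))) (u : String)
    (ur : List (String × Int)) :
    pvKeysOf (done ++ [(u, ur)]) = pvKeysOf done ++ ur.map Prod.fst := by
  simp [pvKeysOf]

lemma dedup_append_nodup (a b : List String) (hb : b.Nodup) :
    PySem.List.dedup (a ++ b)
      = PySem.List.dedup a ++ b.filter (fun x => !(PySem.List.dedup a).contains x) := by
  rw [PySem.List.dedup_eq_ofList, PySem.Set.ofList_eq_foldl, List.foldl_append,
      ← PySem.Set.ofList_eq_foldl, ← PySem.List.dedup_eq_ofList, foldl_add_nodup _ _ hb]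

lemma expand_target (done : List (String × List (String × Int))) (u : String)
    (ur : List (String × Int)) (hnd : (ur.map Prod.fst).Nodup) :
    pvExpand (pvTarget done) u ur = pvTarget (done ++ [(u, ur)]) := by
  have hmapside :
      (pvTarget done).items.map (fun p => ((p : String × PySem.Dict String Int).1,
        match (PySem.Dict.mk ur).get? p.1 with
        | some r => PySem.Dict.mk (p.2.items ++ [(u, r)])
        | none => p.2))
      = (PySem.List.dedup (pvKeysOf done)).map
          (fun c => (c, PySem.Dict.mk (pvBucket (done ++ [(u, ur)]) c))) := by
    rw [pvTarget]
    show List.map _ (List.map _ _) = _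
    rw [List.map_map]
    apply List.map_congr_left
    intro c _
    simp only [Function.comp_def]
    rw [bucket_append done u ur c]
    cases hg : (PySem.Dict.mk ur).get? c <;> simp
  have hfilterside :
      (ur.filter (fun q => !(pvTarget done).contains q.1)).map
          (fun q => (q.1, PySem.Dict.mk [(u, q.2)]))
      = ((ur.map Prod.fst).filter (fun x => !(PySem.List.dedup (pvKeysOf done)).contains x)).map
          (fun c => (c, PySem.Dict.mk (pvBucket (done ++ [(u, ur)]) c))) := by
    rw [List.filter_map]
    rw [List.map_map]
    have hpred : ∀ q ∈ ur, (fun q : String × Int => !(pvTarget done).contains q.1) q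
        = ((fun x => !(PySem.List.dedup (pvKeysOf done)).contains x) ∘ Prod.fst) q := by
      intro q _
      simp only [Function.comp_def, target_contains]
      congr 1
      simp [List.contains_eq_mem]
    rw [List.filter_congr hpred]
    apply List.map_congr_left
    rintro q hq
    have hqm : q ∈ ur := (List.mem_filter.mp hq).1
    have hqp : ¬ (q.1 ∈ pvKeysOf done) := by
      have := (List.mem_filter.mp hq).2
      simpa [List.contains_eq_mem, PySem.List.mem_dedup] using this
    simp only [Function.comp_def]
    rw [bucket_append done u ur q.1, bucket_nil_of_not_mem done q.1 hqp,
        get?_mk_of_mem ur q hqm hnd]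
    rfl
  rw [pvExpand, hmapside, hfilterside, pvTarget, keysOf_append, dedup_append_nodup _ _ hnd,
      List.map_append]

lemma inner_loop_expand (ur : List (String × Int))
    (acc : PySem.Dict String (PySem.Dict String Int)) (u : String)
    (hnd : (ur.map Prod.fst).Nodup)
    (hkeys : (acc.items.map Prod.fst).Nodup)
    (hfresh : ∀ q ∈ ur, ∀ d, acc.get? q.1 = some d → d.contains u = false) :
    ur.foldl (pvInnerStep u) acc = pvExpand acc u ur := by
  induction ur generalizing acc with
  | nil =>
    simp [pvExpand, PySem.Dict.get?]
  | cons q ur' ih =>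
    obtain ⟨c, r⟩ := q
    obtain ⟨hc1, hnd'⟩ : c ∉ ur'.map Prod.fst ∧ (ur'.map Prod.fst).Nodup := by
      simpa using hnd
    rw [List.foldl_cons]
    by_cases hc : acc.contains c
    · -- existing cuisine
      obtain ⟨d, hd⟩ : ∃ d, acc.get? c = some d := by
        cases hg : acc.get? c with
        | none => exact absurd ((PySem.Dict.get?_eq_none_iff_contains acc c).mp hg) (by simp [hc])
        | some d => exact ⟨d, rfl⟩
      have hdu : d.contains u = false := hfresh (c, r) (List.mem_cons_self) d hd
      have hstep : pvInnerStep u acc (c, r)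
          = acc.insert c (PySem.Dict.mk (d.items ++ [(u, r)])) := by
        simp only [pvInnerStep, hc, if_true, PySem.Dict.modify]
        congr 1
        have : acc.getD c (PySem.Dict.mk []) = d := by
          rw [PySem.Dict.getD_eq_get?_getD, hd]; rfl
        rw [this]
        apply dict_items_ext
        rw [PySem.Dict.items_insert_of_not_contains _ _ hdu]
      rw [hstep]
      set acc2 := acc.insert c (PySem.Dict.mk (d.items ++ [(u, r)])) with hacc2
      have hitems2 : acc2.items
          = acc.items.map (fun p => if (p.1 == c) = true then (c, PySem.Dict.mk (d.items ++ [(u, r)])) else p) :=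
        PySem.Dict.items_insert_of_contains _ _ hc
      have hkeys2 : (acc2.items.map Prod.fst).Nodup := by
        rw [hitems2, List.map_map]
        have : acc.items.map (Prod.fst ∘ fun p => if (p.1 == c) = true then (c, PySem.Dict.mk (d.items ++ [(u, r)])) else p)
            = acc.items.map Prod.fst := by
          apply List.map_congr_left
          intro p _
          by_cases hp : (p.1 == c) = true
          · simp [(beq_iff_eq.mp hp).symm]
          · have hne : p.1 ≠ c := by simpa using hp
            simp [hne]
        rw [this]; exact hkeys
      have hfresh2 : ∀ q ∈ ur', ∀ d', acc2.get? q.1 = some d' → d'.contains u = false := by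
        intro q hq d' hg
        have hne : q.1 ≠ c := fun h => hc1 (h ▸ List.mem_map_of_mem hq)
        rw [hacc2, PySem.Dict.get?_insert_of_ne _ _ hne] at hg
        exact hfresh q (List.mem_cons_of_mem _ hq) d' hg
      rw [ih acc2 hnd' hkeys2 hfresh2]
      -- pvExpand acc2 u ur' = pvExpand acc u ((c,r)::ur')
      apply dict_items_ext
      simp only [pvExpand]
      congr 1
      · -- map parts
        rw [hitems2, List.map_map]
        apply List.map_congr_left
        intro p hp
        by_cases hpc : (p.1 == c) = true
        · have hp1 : p.1 = c := beq_iff_eq.mp hpc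
          have hpd : p.2 = d := by
            have hg : acc.get? p.1 = some p.2 :=
              PySem.Dict.get?_of_mem_items acc (by simpa using hp) (by simpa [PySem.Dict.keys] using hkeys)
            rw [hp1, hd] at hg
            exact (Option.some_inj.mp hg).symm
          simp only [Function.comp_def, hpc, if_true]
          rw [get?_mk_eq_none ur' c hc1]
          have hgc : (PySem.Dict.mk ((c, r) :: ur')).get? p.1 = some r := by
            rw [hp1, PySem.Dict.get?]
            simp [List.find?_cons_of_pos]
          rw [hgc]
          simp [hp1, hpd]
        · have hne : p.1 ≠ c := fun h => hpc (beq_iff_eq.mpr h)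
          have hgc : (PySem.Dict.mk ((c, r) :: ur')).get? p.1 = (PySem.Dict.mk ur').get? p.1 := by
            rw [PySem.Dict.get?, PySem.Dict.get?,
              List.find?_cons_of_neg (by simpa using Ne.symm hne)]
          simp [hne, hgc]
      · -- filter parts
        rw [List.filter_cons]
        have : (!acc.contains (c, r).1) = false := by simp [hc]
        rw [this]
        simp only [Bool.false_eq_true, if_false]
        congr 1
        apply List.filter_congr
        intro q hq
        have hne : q.1 ≠ c := fun h => hc1 (h ▸ List.mem_map_of_mem hq)
        rw [hacc2, PySem.Dict.contains_insert]
        simp [hne]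
    · -- new cuisine
      have hc' : acc.contains c = false := by simpa using hc
      have hstep : pvInnerStep u acc (c, r) = acc.insert c (PySem.Dict.mk [(u, r)]) := by
        simp only [pvInnerStep, hc', if_false, Bool.false_eq_true, PySem.Dict.modify]
        have hg : (acc.insert c (PySem.Dict.mk [])).getD c (PySem.Dict.mk []) = PySem.Dict.mk [] := by
          rw [PySem.Dict.getD_eq_get?_getD, PySem.Dict.get?_insert_self]; rfl
        rw [hg]
        have : (PySem.Dict.mk ([] : List (String × Int))).insert u r = PySem.Dict.mk [(u, r)] := by
          apply dict_items_ext
          rw [PySem.Dict.items_insert_of_not_contains _ _ (by rfl)]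
          rfl
        rw [this, insert_insert_same]
      rw [hstep]
      set acc2 := acc.insert c (PySem.Dict.mk [(u, r)]) with hacc2
      have hitems2 : acc2.items = acc.items ++ [(c, PySem.Dict.mk [(u, r)])] :=
        PySem.Dict.items_insert_of_not_contains _ _ hc'
      have hcnotin : c ∉ acc.items.map Prod.fst := by
        intro hm
        obtain ⟨p, hp, hpc⟩ := List.mem_map.mp hm
        exact not_fst_eq_of_not_contains acc c hc' p hp hpc
      have hkeys2 : (acc2.items.map Prod.fst).Nodup := by
        rw [hitems2]
        simp only [List.map_append, List.map_cons, List.map_nil]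
        rw [List.nodup_append]
        refine ⟨hkeys, List.nodup_singleton _, ?_⟩
        intro a ha b hb
        simp only [List.mem_singleton] at hb
        subst hb
        exact fun h => hcnotin (h ▸ ha)
      have hfresh2 : ∀ q ∈ ur', ∀ d', acc2.get? q.1 = some d' → d'.contains u = false := by
        intro q hq d' hg
        have hne : q.1 ≠ c := fun h => hc1 (h ▸ List.mem_map_of_mem hq)
        rw [hacc2, PySem.Dict.get?_insert_of_ne _ _ hne] at hg
        exact hfresh q (List.mem_cons_of_mem _ hq) d' hg
      rw [ih acc2 hnd' hkeys2 hfresh2]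
      apply dict_items_ext
      simp only [pvExpand]
      rw [hitems2, List.map_append]
      have hmapsingle : List.map (fun p => ((p : String × PySem.Dict String Int).1,
          match (PySem.Dict.mk ur').get? p.1 with
          | some r' => PySem.Dict.mk (p.2.items ++ [(u, r')])
          | none => p.2)) [(c, PySem.Dict.mk [(u, r)])] = [(c, PySem.Dict.mk [(u, r)])] := by
        simp [get?_mk_eq_none ur' c hc1]
      rw [hmapsingle]
      have hmapacc : List.map (fun p => ((p : String × PySem.Dict String Int).1,
          match (PySem.Dict.mk ur').get? p.1 with
          | some r' => PySem.Dict.mk (p.2.items ++ [(u, r')])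
          | none => p.2)) acc.items
          = List.map (fun p => ((p : String × PySem.Dict String Int).1,
          match (PySem.Dict.mk ((c, r) :: ur')).get? p.1 with
          | some r' => PySem.Dict.mk (p.2.items ++ [(u, r')])
          | none => p.2)) acc.items := by
        apply List.map_congr_left
        intro p hp
        have hne : p.1 ≠ c := not_fst_eq_of_not_contains acc c hc' p hp
        have hgc : (PySem.Dict.mk ((c, r) :: ur')).get? p.1 = (PySem.Dict.mk ur').get? p.1 := by
          rw [PySem.Dict.get?, PySem.Dict.get?,
            List.find?_cons_of_neg (by simpa using Ne.symm hne)]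
        rw [hgc]
      rw [hmapacc]
      have hfiltereq : ur'.filter (fun q => !acc2.contains q.1)
          = ur'.filter (fun q => !acc.contains q.1) := by
        apply List.filter_congr
        intro q hq
        have hne : q.1 ≠ c := fun h => hc1 (h ▸ List.mem_map_of_mem hq)
        rw [hacc2, PySem.Dict.contains_insert]
        simp [hne]
      rw [hfiltereq]
      have hfiltercons : List.filter (fun q => !acc.contains q.1) ((c, r) :: ur')
          = (c, r) :: ur'.filter (fun q => !acc.contains q.1) := by
        rw [List.filter_cons]
        simp [hc']
      rw [hfiltercons]
      simp

lemma fold_eq_target (ratings : List (String × List (String × Int)))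
    (hpre : Pre_transform_ratings_to_cuisine ratings) :
    ratings.foldl pvUserStep (PySem.Dict.mk []) = pvTarget ratings := by
  induction ratings using List.reverseRecOn with
  | nil => rfl
  | append_singleton done x ih =>
    obtain ⟨u, ur⟩ := x
    obtain ⟨hout, hin⟩ := hpre
    rw [List.map_append] at hout
    have hdone_nodup : (done.map Prod.fst).Nodup := (List.nodup_append.mp hout).1
    have hu : u ∉ done.map Prod.fst := by
      intro hm
      rcases List.nodup_append.mp hout with ⟨_, _, hdisj⟩
      exact hdisj u hm u (by simp) rfl
    have hurnd : (ur.map Prod.fst).Nodup := by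
      simpa using hin (u, ur) (by simp)
    have hpre' : Pre_transform_ratings_to_cuisine done :=
      ⟨hdone_nodup, fun p hp => hin p (List.mem_append_left _ hp)⟩
    rw [List.foldl_append, ih hpre', List.foldl_cons, List.foldl_nil, pvUserStep]
    have htkeys : ((pvTarget done).items.map Prod.fst).Nodup := by
      rw [pvTarget]
      show (List.map Prod.fst (List.map _ _)).Nodup
      rw [List.map_map]
      have : (Prod.fst ∘ fun c => (c, PySem.Dict.mk (pvBucket done c))) = id := rfl
      rw [this, List.map_id]
      exact PySem.List.nodup_dedup _
    rw [inner_loop_expand ur (pvTarget done) u hurnd htkeys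
          (fun q _ d hg => target_fresh done u hu q.1 d hg)]
    exact expand_target done u ur hurnd

-- ===== VERDICT (by name: the statement is the Claim_ definition above) =====
theorem transform_ratings_to_cuisine_spec : Claim_equal_transform_ratings_to_cuisine := by
  intro ratings _ hpre
  unfold Spec_transform_ratings_to_cuisine
  unfold transform_ratings_to_cuisine transform_ratings_to_cuisine_alt
  rw [fold_eq_target ratings hpre]
  simp [pvTarget, List.map_map, pvKeysOf, Function.comp]
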